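-- pv_equiv track=rewrite | github.com/Phina-cius/pythonBasic | calculator.py | separate_symbols
-- ===== SOURCE A (Python) =====
-- def separate_symbols(input_string):
--     characters = []
--     integers = []
--     symbols = []
--     for char in input_string:
--         if char.isalpha():
--             characters.append(char)
--         elif char.isdigit():
--             integers.append(char)
--         else:
--             symbols.append(char)
--     return characters, integers, symbols
-- ===== SOURCE B (Python) =====
-- def separate_symbols(input_string):
--     characters = [c for c in input_string if c.isalpha()]
--     integers = [c for c in input_string if c.isdigit()]
--     symbols = [c for c in input_string if not c.isalpha() and not c.isdigit()]
--     return characters, integers, symbols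
-- ===== Notes on version B (the rewrite author's own statement) =====
-- stated objective: alternative
-- what changed: Replaces the single branching loop maintaining three accumulators with three independent filtering comprehensions, one per category.
import Mathlib
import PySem

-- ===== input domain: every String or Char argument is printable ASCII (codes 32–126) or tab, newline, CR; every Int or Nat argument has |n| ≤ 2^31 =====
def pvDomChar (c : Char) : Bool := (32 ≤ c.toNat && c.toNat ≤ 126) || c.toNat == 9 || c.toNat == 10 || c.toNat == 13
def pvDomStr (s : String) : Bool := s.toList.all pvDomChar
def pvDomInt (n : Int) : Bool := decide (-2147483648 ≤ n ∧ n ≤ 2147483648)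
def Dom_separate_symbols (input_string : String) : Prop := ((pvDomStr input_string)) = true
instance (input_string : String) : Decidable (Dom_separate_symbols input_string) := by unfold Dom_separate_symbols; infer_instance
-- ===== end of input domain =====

-- B is an alternative decomposition: three independent filters instead of one branching loop with three accumulators.

-- ===== PORT A =====
-- single pass, three accumulators, branch order alpha / digit / else, append at the back
def separate_symbols (input_string : String) : List String × List String × List String :=
  input_string.toList.foldl
    (fun (acc : List String × List String × List String) char =>
      if PySem.Chars.isalpha char then (acc.1 ++ [String.ofList [char]], acc.2.1, acc.2.2)
      else if PySem.Chars.isdigit char then (acc.1, acc.2.1 ++ [String.ofList [char]], acc.2.2)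
      else (acc.1, acc.2.1, acc.2.2 ++ [String.ofList [char]]))
    ([], [], [])

-- ===== PORT B =====
-- three independent filtering comprehensions
def separate_symbols_alt (input_string : String) : List String × List String × List String :=
  ((input_string.toList.filter (fun c => PySem.Chars.isalpha c)).map (fun c => String.ofList [c]),
   (input_string.toList.filter (fun c => PySem.Chars.isdigit c)).map (fun c => String.ofList [c]),
   (input_string.toList.filter (fun c => !PySem.Chars.isalpha c && !PySem.Chars.isdigit c)).map (fun c => String.ofList [c]))

-- ===== PRECONDITION & SPEC =====
def Spec_separate_symbols (input_string : String) (out : List String × List String × List String) : Prop := out = separate_symbols_alt input_string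
instance (input_string : String) (out : List String × List String × List String) : Decidable (Spec_separate_symbols input_string out) := by unfold Spec_separate_symbols; infer_instance

-- ===== CLAIM (what is proved, stated in full; the proofs are below) =====
def Claim_equal_separate_symbols : Prop := ∀ (input_string : String), Dom_separate_symbols input_string → Spec_separate_symbols input_string (separate_symbols input_string)

-- ===== LEMMAS AND PROOFS =====
theorem isdigit_false_of_isalpha (c : Char) (h : PySem.Chars.isalpha c = true) :
    PySem.Chars.isdigit c = false := by
  simp [PySem.Chars.isalpha, PySem.Chars.isdigit, PySem.Chars.isupper, PySem.Chars.islower,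
    Char.le_def, UInt32.le_iff_toNat_le] at *
  omega

theorem separate_symbols_foldl_inv (l : List Char) (a b c : List String) :
    l.foldl
      (fun (acc : List String × List String × List String) char =>
        if PySem.Chars.isalpha char then (acc.1 ++ [String.ofList [char]], acc.2.1, acc.2.2)
        else if PySem.Chars.isdigit char then (acc.1, acc.2.1 ++ [String.ofList [char]], acc.2.2)
        else (acc.1, acc.2.1, acc.2.2 ++ [String.ofList [char]]))
      (a, b, c)
    = (a ++ (l.filter (fun ch => PySem.Chars.isalpha ch)).map (fun ch => String.ofList [ch]),
       b ++ (l.filter (fun ch => PySem.Chars.isdigit ch)).map (fun ch => String.ofList [ch]),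
       c ++ (l.filter (fun ch => !PySem.Chars.isalpha ch && !PySem.Chars.isdigit ch)).map (fun ch => String.ofList [ch])) := by
  induction l generalizing a b c with
  | nil => simp
  | cons x xs ih =>
    simp only [List.foldl_cons, List.filter_cons]
    by_cases hx : PySem.Chars.isalpha x = true
    · simp [hx, isdigit_false_of_isalpha x hx, ih]
    · by_cases hd : PySem.Chars.isdigit x = true
      · simp [hx, hd, ih]
      · simp [hx, hd, ih]

-- ===== VERDICT (by name: the statement is the Claim_ definition above) =====
theorem separate_symbols_spec : Claim_equal_separate_symbols := by
  intro s _
  unfold Spec_separate_symbols separate_symbols separate_symbols_alt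
  simpa using separate_symbols_foldl_inv s.toList [] [] []
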